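-- pv_equiv track=rewrite | github.com/onesinus/technical-test | 2.py | breakStringIntoList
-- ===== SOURCE A (Python) =====
-- def breakStringIntoList (str_word, arr_words):
--   result = [];
--
--   totalStrWord = len(str_word);
--   tmp_letter_combination = []
--   for w in range(totalStrWord):
--     for x in range(w,totalStrWord):
--       tmp_word = '';
--       for y in range(w, x+1):
--         tmp_word += str_word[y];
--
--       tmp_letter_combination.append(tmp_word);
--
--   for word in arr_words:
--     for letter_combination in tmp_letter_combination:
--       if word == letter_combination:
--         result.append(word);
--
--   if len(result) <= 1:
--     return "<no way>";
--   else: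
--     return ', '.join(result);
-- ===== SOURCE B (Python) =====
-- def breakStringIntoList(str_word, arr_words):
--     result = []
--     n = len(str_word)
--     for word in arr_words:
--         k = len(word)
--         if k == 0:
--             continue
--         occ = sum(1 for i in range(n - k + 1) if str_word[i:i+k] == word)
--         result.extend([word] * occ)
--     if len(result) <= 1:
--         return "<no way>"
--     return ', '.join(result)
-- ===== Notes on version B (the rewrite author's own statement) =====
-- stated objective: faster
-- what changed: B counts each word's overlapping occurrences by sliding a window directly over str_word instead of first materialising the list of all O(n^2) substrings (built char-by-char in O(n^3)) and scanning it per word.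
import Mathlib
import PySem

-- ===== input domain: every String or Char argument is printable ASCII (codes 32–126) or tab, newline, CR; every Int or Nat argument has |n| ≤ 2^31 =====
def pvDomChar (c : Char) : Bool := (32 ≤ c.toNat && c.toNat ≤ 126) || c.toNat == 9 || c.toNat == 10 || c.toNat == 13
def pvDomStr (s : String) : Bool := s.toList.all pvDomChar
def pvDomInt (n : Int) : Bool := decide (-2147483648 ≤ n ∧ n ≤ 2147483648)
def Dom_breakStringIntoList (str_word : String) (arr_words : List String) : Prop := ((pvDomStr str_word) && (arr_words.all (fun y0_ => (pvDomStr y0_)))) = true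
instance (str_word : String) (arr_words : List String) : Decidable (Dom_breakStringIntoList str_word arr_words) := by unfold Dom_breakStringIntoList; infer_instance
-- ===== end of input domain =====

-- B replaces A's O(n^3) substring enumeration + per-word scan by a direct sliding-window
-- occurrence count per word (measured faster); same return value on every input.

-- ===== PORT A =====
-- Port of A: enumerates every substring (built char-by-char), then scans that list per word.
-- Python str_word[y] is always in range here (y < len); ported with pyGetD (default unreachable).
def breakStringIntoList (str_word : String) (arr_words : List String) : String :=
  let cs := str_word.toList
  let totalStrWord : Int := (cs.length : Int)
  let tmp_letter_combination : List (List Char) :=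
    (PySem.List.pyRange 0 totalStrWord).foldl (fun tmp w =>
      (PySem.List.pyRange w totalStrWord).foldl (fun tmp x =>
        let tmp_word : List Char :=
          (PySem.List.pyRange w (x + 1)).foldl (fun t y => t ++ [PySem.List.pyGetD cs y ' ']) []
        tmp ++ [tmp_word]) tmp) []
  let result : List (List Char) :=
    arr_words.foldl (fun result word =>
      tmp_letter_combination.foldl (fun result lc =>
        if word.toList == lc then result ++ [word.toList] else result) result) []
  if result.length ≤ 1 then "<no way>"
  else String.ofList (PySem.Chars.join ", ".toList result)

-- ===== PORT B =====
-- Port of B: per word, count overlapping occurrences by sliding a window over str_word.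
def breakStringIntoList_alt (str_word : String) (arr_words : List String) : String :=
  let cs := str_word.toList
  let n : Int := (cs.length : Int)
  let result : List (List Char) :=
    arr_words.foldl (fun result word =>
      let wl := word.toList
      let k : Int := (wl.length : Int)
      if k == 0 then result
      else
        let occ : Nat :=
          (PySem.List.pyRange 0 (n - k + 1)).countP
            (fun i => PySem.List.slice cs (some i) (some (i + k)) == wl)
        result ++ List.replicate occ wl) []
  if result.length ≤ 1 then "<no way>"
  else String.ofList (PySem.Chars.join ", ".toList result)

-- ===== PRECONDITION & SPEC =====
def Spec_breakStringIntoList (str_word : String) (arr_words : List String) (out : String) : Prop := out = breakStringIntoList_alt str_word arr_words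
instance (str_word : String) (arr_words : List String) (out : String) : Decidable (Spec_breakStringIntoList str_word arr_words out) := by unfold Spec_breakStringIntoList; infer_instance

-- ===== CLAIM (what is proved, stated in full; the proofs are below) =====
def Claim_equal_breakStringIntoList : Prop := ∀ (str_word : String) (arr_words : List String), Dom_breakStringIntoList str_word arr_words → Spec_breakStringIntoList str_word arr_words (breakStringIntoList str_word arr_words)

-- ===== LEMMAS AND PROOFS =====
lemma pvRange_nil (a b : Int) (h : b ≤ a) : PySem.List.pyRange a b = [] := by
  rw [List.eq_nil_iff_forall_not_mem]
  intro x hx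
  rw [PySem.List.mem_pyRange_one] at hx
  omega
lemma pvSumIte {α : Type} (p : α → Bool) (l : List α) :
    (l.map (fun x => if p x then (1 : Nat) else 0)).sum = l.countP p := by
  induction l with
  | nil => simp
  | cons x l ih =>
    by_cases h : p x
    · simp [h, ih]
      omega
    · simp [h, ih]
lemma pvCountUnique (a m c : Nat) (q : Bool) :
    (List.range' a m).countP (fun x => decide (x = c) && q)
    = if c ∈ List.range' a m ∧ q = true then 1 else 0 := by
  cases q with
  | false => simp
  | true =>
    simp only [Bool.and_true, and_true]
    by_cases h : c ∈ List.range' a m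
    · simp only [h, if_true]
      have := List.count_eq_one_of_mem (List.nodup_range' 1) h
      simpa [List.count_eq_countP] using this
    · simp only [h, if_false]
      have := List.count_eq_zero_of_not_mem (l := List.range' a m) h
      simpa [List.count_eq_countP] using this
lemma pvMapGetD (cs : List Char) (a m : Nat) (h : a + m ≤ cs.length) :
    (List.range' a m).map (fun y => cs.getD y ' ') = (cs.drop a).take m := by
  apply List.ext_getElem
  · simp; omega
  · intro i h1 h2
    simp only [List.getElem_map, List.getElem_range', List.getElem_take, List.getElem_drop]
    rw [List.getD_eq_getElem]
    · congr 1; omega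
    · simp at h1; omega
lemma pvFlatMapSing {α β : Type} (f : α → β) (l : List α) :
    l.flatMap (fun x => [f x]) = l.map f := by
  induction l with
  | nil => rfl
  | cons x l ih => simp [ih]
lemma pvFoldRange {β : Type} (g : Int → List β) (m a : Nat) (acc : List β) :
    (PySem.List.pyRange (a : Int) ((a + m : Nat) : Int)).foldl (fun acc i => acc ++ g i) acc
    = acc ++ (List.range' a m).flatMap (fun i : Nat => g (i : Int)) := by
  induction m generalizing a acc with
  | zero => simp
  | succ m ih =>
    rw [PySem.List.pyRange_one_cons (by omega : (a:Int) < ((a + (m+1) : Nat) : Int))]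
    have h1 : (a : Int) + 1 = ((a + 1 : Nat) : Int) := by push_cast; ring
    have h2 : ((a + (m + 1) : Nat) : Int) = (((a+1) + m : Nat) : Int) := by push_cast; ring
    rw [List.foldl_cons, h1, h2, ih (a+1), List.range'_succ]
    simp
lemma pvFoldRange' {β : Type} (g : Int → List β) (a b : Nat) (acc : List β) :
    (PySem.List.pyRange (a : Int) (b : Int)).foldl (fun acc i => acc ++ g i) acc
    = acc ++ (List.range' a (b - a)).flatMap (fun i : Nat => g (i : Int)) := by
  by_cases h : a ≤ b
  · obtain ⟨m, rfl⟩ := Nat.le.dest h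
    rw [Nat.add_sub_cancel_left]
    exact pvFoldRange g m a acc
  · rw [pvRange_nil _ _ (by omega)]
    have : b - a = 0 := by omega
    simp [this]
lemma pvFoldRange0 {β : Type} (g : Int → List β) (n : Nat) (acc : List β) :
    (PySem.List.pyRange 0 (n : Int)).foldl (fun acc i => acc ++ g i) acc
    = acc ++ (List.range n).flatMap (fun i : Nat => g (i : Int)) := by
  have h := pvFoldRange' g 0 n acc
  simpa [List.range_eq_range'] using h
lemma pvCountRange (p : Int → Bool) (n : Nat) :
    (PySem.List.pyRange 0 (n : Int)).countP p = (List.range n).countP (fun i : Nat => p (i : Int)) := by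
  rw [PySem.List.pyRange_zero_natCast, List.countP_map]
  rfl
lemma pvBuild (cs : List Char) (w b : Nat) (hw : w ≤ b) (hb : b ≤ cs.length) :
    (PySem.List.pyRange (w : Int) (b : Int)).foldl
      (fun t y => t ++ [PySem.List.pyGetD cs y ' ']) []
    = (cs.drop w).take (b - w) := by
  rw [pvFoldRange' (fun y => [PySem.List.pyGetD cs y ' ']) w b [], List.nil_append]
  rw [pvFlatMapSing]
  rw [← pvMapGetD cs w (b - w) (by omega)]
  apply List.map_congr_left
  intro y hy
  rw [List.mem_range'_1] at hy
  simp [PySem.List.pyGetD_natCast]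
lemma pvTmp (cs : List Char) :
    ((PySem.List.pyRange 0 (cs.length : Int)).foldl (fun tmp w =>
      (PySem.List.pyRange w (cs.length : Int)).foldl (fun tmp x =>
        tmp ++ [(PySem.List.pyRange w (x + 1)).foldl
          (fun t y => t ++ [PySem.List.pyGetD cs y ' ']) []]) tmp) [])
    = (List.range cs.length).flatMap (fun w =>
        (List.range' w (cs.length - w)).map (fun x => (cs.drop w).take (x + 1 - w))) := by
  have step : ∀ (tmp : List (List Char)), ∀ w ∈ List.range cs.length,
      (PySem.List.pyRange (w : Int) (cs.length : Int)).foldl (fun tmp x =>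
        tmp ++ [(PySem.List.pyRange (w : Int) (x + 1)).foldl
          (fun t y => t ++ [PySem.List.pyGetD cs y ' ']) []]) tmp
      = tmp ++ (List.range' w (cs.length - w)).map (fun x => (cs.drop w).take (x + 1 - w)) := by
    intro tmp w hw
    rw [List.mem_range] at hw
    rw [pvFoldRange' (fun x => [(PySem.List.pyRange (w : Int) (x + 1)).foldl
          (fun t y => t ++ [PySem.List.pyGetD cs y ' ']) []]) w cs.length tmp]
    rw [pvFlatMapSing]
    congr 1
    apply List.map_congr_left
    intro x hx
    rw [List.mem_range'_1] at hx
    have h1 : ((x : Int) + 1) = ((x + 1 : Nat) : Int) := by push_cast; ring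
    rw [h1, pvBuild cs w (x + 1) (by omega) (by omega)]
  have step' : ∀ (tmp : List (List Char)), ∀ w ∈ PySem.List.pyRange 0 (cs.length : Int),
      (PySem.List.pyRange w (cs.length : Int)).foldl (fun tmp x =>
        tmp ++ [(PySem.List.pyRange w (x + 1)).foldl
          (fun t y => t ++ [PySem.List.pyGetD cs y ' ']) []]) tmp
      = tmp ++ (List.range' w.toNat (cs.length - w.toNat)).map
          (fun x => (cs.drop w.toNat).take (x + 1 - w.toNat)) := by
    intro tmp w hw
    rw [PySem.List.mem_pyRange_one] at hw
    have hww : w = (w.toNat : Int) := (Int.toNat_of_nonneg hw.1).symm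
    rw [hww]
    apply step
    rw [List.mem_range]
    omega
  rw [PySem.List.foldl_congr_mem _ _
    (fun tmp (w : Int) => tmp ++ (List.range' w.toNat (cs.length - w.toNat)).map
      (fun x => (cs.drop w.toNat).take (x + 1 - w.toNat))) _ step']
  rw [pvFoldRange0 (fun w => (List.range' w.toNat (cs.length - w.toNat)).map
      (fun x => (cs.drop w.toNat).take (x + 1 - w.toNat))) cs.length []]
  simp [Int.toNat_natCast]
lemma pvCountA (cs wl : List Char) :
    ((List.range cs.length).flatMap (fun w =>
      (List.range' w (cs.length - w)).map (fun x => (cs.drop w).take (x + 1 - w)))).countP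
        (fun lc => wl == lc)
    = if 1 ≤ wl.length ∧ wl.length ≤ cs.length then
        (List.range (cs.length - wl.length + 1)).countP
          (fun i => decide ((cs.drop i).take wl.length = wl))
      else 0 := by
  rw [List.countP_flatMap]
  have hmap : ∀ w ∈ List.range cs.length,
      ((List.countP (fun lc => wl == lc)) ∘ (fun w =>
        (List.range' w (cs.length - w)).map (fun x => (cs.drop w).take (x + 1 - w)))) w
      = if (w + wl.length - 1 ∈ List.range' w (cs.length - w) ∧
            (decide (1 ≤ wl.length ∧ (cs.drop w).take wl.length = wl)) = true) then 1 else 0 := by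
    intro w hw
    rw [List.mem_range] at hw
    simp only [Function.comp, List.countP_map]
    rw [List.countP_congr (q := fun x => decide (x = w + wl.length - 1) &&
        decide (1 ≤ wl.length ∧ (cs.drop w).take wl.length = wl)) ?_]
    · exact pvCountUnique w (cs.length - w) (w + wl.length - 1) _
    · intro x hx
      rw [List.mem_range'_1] at hx
      simp only [Function.comp, beq_iff_eq, Bool.and_eq_true, decide_eq_true_eq]
      constructor
      · intro h
        have hlen : wl.length = min (x + 1 - w) (cs.length - w) := by
          rw [h]; simp
        have hxw : wl.length = x + 1 - w := by omega
        have hx1 : x = w + wl.length - 1 := by omega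
        refine ⟨hx1, by omega, ?_⟩
        rw [hxw]; exact h.symm
      · rintro ⟨hx1, h1, hq⟩
        have : x + 1 - w = wl.length := by omega
        rw [this]; exact hq.symm
  rw [List.map_congr_left hmap]
  by_cases h : 1 ≤ wl.length ∧ wl.length ≤ cs.length
  · rw [if_pos h]
    have hterm : ∀ w ∈ List.range cs.length,
        (if (w + wl.length - 1 ∈ List.range' w (cs.length - w) ∧
            (decide (1 ≤ wl.length ∧ (cs.drop w).take wl.length = wl)) = true) then 1 else 0)
        = if (decide (w ≤ cs.length - wl.length ∧ (cs.drop w).take wl.length = wl)) = true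
          then (1:Nat) else 0 := by
      intro w hw
      rw [List.mem_range] at hw
      apply if_congr _ rfl rfl
      rw [List.mem_range'_1]
      simp only [decide_eq_true_eq]
      constructor
      · rintro ⟨hm, _, hq⟩; exact ⟨by omega, hq⟩
      · rintro ⟨hle, hq⟩; exact ⟨⟨by omega, by omega⟩, by omega, hq⟩
    rw [List.map_congr_left hterm, pvSumIte]
    have hsplit : List.range cs.length = List.range (cs.length - wl.length + 1) ++
        (List.range (wl.length - 1)).map (fun x => (cs.length - wl.length + 1) + x) := by
      rw [← List.range_add]; congr 1; omega
    rw [hsplit, List.countP_append]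
    have h2 : (List.countP (fun w => decide (w ≤ cs.length - wl.length ∧
        (cs.drop w).take wl.length = wl)) ((List.range (wl.length - 1)).map
          (fun x => (cs.length - wl.length + 1) + x))) = 0 := by
      rw [List.countP_eq_zero]
      intro a ha
      rw [List.mem_map] at ha
      obtain ⟨x, _, rfl⟩ := ha
      simp only [decide_eq_true_eq, not_and]
      intro hle
      omega
    rw [h2, Nat.add_zero]
    apply List.countP_congr
    intro w hw
    rw [List.mem_range] at hw
    simp only [decide_eq_true_eq]
    constructor
    · rintro ⟨_, hq⟩; exact hq
    · intro hq; exact ⟨by omega, hq⟩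
  · rw [if_neg h]
    have hterm : ∀ w ∈ List.range cs.length,
        (if (w + wl.length - 1 ∈ List.range' w (cs.length - w) ∧
            (decide (1 ≤ wl.length ∧ (cs.drop w).take wl.length = wl)) = true) then 1 else 0)
        = (0:Nat) := by
      intro w hw
      rw [List.mem_range] at hw
      rw [if_neg]
      rintro ⟨hm, hq⟩
      rw [List.mem_range'_1] at hm
      simp only [decide_eq_true_eq] at hq
      omega
    rw [List.map_congr_left hterm]
    simp
lemma pvCountB (cs wl : List Char) (h : 1 ≤ wl.length) :
    (PySem.List.pyRange 0 ((cs.length : Int) - (wl.length : Int) + 1)).countP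
      (fun i => PySem.List.slice cs (some i) (some (i + (wl.length : Int))) == wl)
    = if wl.length ≤ cs.length then
        (List.range (cs.length - wl.length + 1)).countP
          (fun i => decide ((cs.drop i).take wl.length = wl))
      else 0 := by
  by_cases hKN : wl.length ≤ cs.length
  · have hcast : (cs.length : Int) - (wl.length : Int) + 1
        = ((cs.length - wl.length + 1 : Nat) : Int) := by omega
    rw [hcast, pvCountRange, if_pos hKN]
    apply List.countP_congr
    intro i hi
    rw [List.mem_range] at hi
    have h1 : (i : Int) + (wl.length : Int) = ((i + wl.length : Nat) : Int) := by push_cast; ring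
    rw [h1, PySem.List.slice_natCast]
    simp only [beq_iff_eq, decide_eq_true_eq]
    have h2 : i + wl.length - i = wl.length := by omega
    rw [h2]
  · rw [pvRange_nil _ _ (by omega), if_neg hKN]
    rfl
lemma pvResult (cs : List Char) (arr : List String) :
    arr.foldl (fun result word =>
      ((PySem.List.pyRange 0 (cs.length : Int)).foldl (fun tmp w =>
        (PySem.List.pyRange w (cs.length : Int)).foldl (fun tmp x =>
          tmp ++ [(PySem.List.pyRange w (x + 1)).foldl
            (fun t y => t ++ [PySem.List.pyGetD cs y ' ']) []]) tmp) []).foldl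
        (fun result lc => if word.toList == lc then result ++ [word.toList] else result)
        result) []
    = arr.foldl (fun result word =>
        if (word.toList.length : Int) == 0 then result
        else result ++ List.replicate
          ((PySem.List.pyRange 0 ((cs.length : Int) - (word.toList.length : Int) + 1)).countP
            (fun i => PySem.List.slice cs (some i) (some (i + (word.toList.length : Int)))
              == word.toList)) word.toList) [] := by
  rw [pvTmp cs]
  apply PySem.List.foldl_congr_mem
  intro res word _
  rw [PySem.List.foldl_append_if]
  have hrep : ((((List.range cs.length).flatMap (fun w =>
      (List.range' w (cs.length - w)).map (fun x => (cs.drop w).take (x + 1 - w)))).filter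
        (fun lc => word.toList == lc)).map (fun _ => word.toList))
      = List.replicate (((List.range cs.length).flatMap (fun w =>
      (List.range' w (cs.length - w)).map (fun x => (cs.drop w).take (x + 1 - w)))).countP
        (fun lc => word.toList == lc)) word.toList := by
    rw [List.map_const', List.countP_eq_length_filter]
  rw [hrep, pvCountA]
  by_cases hK : word.toList.length = 0
  · have hc : ((word.toList.length : Int) == 0) = true := by simp [hK]
    rw [hc, if_pos rfl]
    rw [if_neg (by simp [hK])]
    simp
  · have hc : ((word.toList.length : Int) == 0) = false := by
      simp only [beq_eq_false_iff_ne, ne_eq, Int.natCast_eq_zero]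
      exact hK
    rw [hc]
    simp only [Bool.false_eq_true, if_false]
    rw [pvCountB cs word.toList (by omega)]
    congr 2
    apply if_congr _ rfl rfl
    constructor
    · rintro ⟨_, h2⟩; exact h2
    · intro h2; exact ⟨by omega, h2⟩

-- ===== VERDICT (by name: the statement is the Claim_ definition above) =====
theorem breakStringIntoList_spec : Claim_equal_breakStringIntoList := by
  intro str_word arr_words _
  unfold Spec_breakStringIntoList
  simp only [breakStringIntoList, breakStringIntoList_alt]
  rw [pvResult str_word.toList arr_words]
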